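-- pv_equiv track=rewrite | github.com/Talkave/Python_training | Advent of code/Advent of code 8.py | encoded_length
-- ===== SOURCE A (Python) =====
-- def encoded_length(s):
--     chars = ['"']  # do każdego słowa na początku mamy dodać " bo python odczytuje stringi bez ""
--     for c in s: # więc dla każdego znaku w słowie:
--         if c == '"': # jeśli znak jest równy \"
--             chars.append('\\"') # dodaj do listy znaków \\"
--         elif c == '\\': # jeśli znak jest równy \
--             chars.append('\\\\') # to dodaj do znaku \\
-- # tak jak na przykład w "aaa\"aaa", to python odczytuje to jako aaa"aaa, czyli na początku słowa dodajemy ", idziemy po a a a dochodzimy do " i dodajemy \"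
-- # idziemy dalej po słowie a a a i doszliśmy do końca
--         else: # jeśli słowo nie zawiera żadnej escape sequence
--             chars.append(c) # dodaj całe słowo do chars
--     chars.append('"')  # i na koniec słowa dodajemy drugi cudzysłów
--     return len(''.join(chars)) # i teraz sklej całą powstałą w ten sposób listę chars bez żadnych przerw w jeden string i zwróć jego długość
-- ===== SOURCE B (Python) =====
-- def encoded_length(s):
--     # closed form: 2 surrounding quotes, plus one extra escape char per '"' or '\'
--     return len(s) + 2 + sum(c in '"\\' for c in s)
-- ===== Notes on version B (the rewrite author's own statement) =====
-- stated objective: simpler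
-- what changed: Replaces the loop that builds a list of escaped chunks and joins/measures it with a closed-form arithmetic expression: len(s) + 2 plus one per character needing an escape.
import Mathlib
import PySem

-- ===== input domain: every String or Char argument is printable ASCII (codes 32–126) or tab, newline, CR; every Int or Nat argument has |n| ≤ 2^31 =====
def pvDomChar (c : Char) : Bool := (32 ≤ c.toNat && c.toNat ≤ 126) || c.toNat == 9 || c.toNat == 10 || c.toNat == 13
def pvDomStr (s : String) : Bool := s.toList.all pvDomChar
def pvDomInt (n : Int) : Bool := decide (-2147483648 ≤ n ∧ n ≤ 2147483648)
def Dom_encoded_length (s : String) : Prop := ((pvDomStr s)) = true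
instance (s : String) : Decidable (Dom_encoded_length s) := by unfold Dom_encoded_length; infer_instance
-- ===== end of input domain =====

-- B replaces A's chunk-list building loop + join with a closed-form arithmetic expression (simpler).


-- ===== PORT A =====
-- one loop step: append the escaped chunk for c to the chunk list
def encAStep (chars : List (List Char)) (c : Char) : List (List Char) :=
  if c = '"' then chars ++ [['\\', '"']]
  else if c = '\\' then chars ++ [['\\', '\\']]
  else chars ++ [[c]]

def encoded_length (s : String) : Int :=
  ((((s.toList.foldl encAStep [['"']]) ++ [['"']]).flatten).length : Int)

-- ===== PORT B =====
def encoded_length_alt (s : String) : Int :=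
  (s.toList.length : Int) + 2 +
    (s.toList.map (fun c => if c = '"' ∨ c = '\\' then (1 : Int) else 0)).sum

-- ===== PRECONDITION & SPEC =====
def Spec_encoded_length (s : String) (out : Int) : Prop := out = encoded_length_alt s
instance (s : String) (out : Int) : Decidable (Spec_encoded_length s out) := by unfold Spec_encoded_length; infer_instance

-- ===== CLAIM (what is proved, stated in full; the proofs are below) =====
def Claim_equal_encoded_length : Prop := ∀ (s : String), Dom_encoded_length s → Spec_encoded_length s (encoded_length s)

-- ===== LEMMAS AND PROOFS =====

-- each loop step adds a chunk of length 2 (escaped char) or 1 (plain char)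
lemma encA_foldl_flatten_length (l : List Char) :
    ∀ acc : List (List Char),
      ((l.foldl encAStep acc).flatten).length =
        acc.flatten.length + (l.map (fun c => if c = '"' ∨ c = '\\' then 2 else 1)).sum := by
  induction l with
  | nil => intro acc; simp
  | cons c t ih =>
    intro acc
    simp only [List.foldl_cons, List.map_cons, List.sum_cons, ih, encAStep]
    split_ifs with h1 h2 <;> simp_all <;> omega

theorem encoded_length_spec : Claim_equal_encoded_length := by
  intro s _
  unfold Spec_encoded_length encoded_length encoded_length_alt
  rw [List.flatten_append, List.length_append, encA_foldl_flatten_length]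
  induction s.toList with
  | nil => simp
  | cons c t ih =>
    simp only [List.map_cons, List.sum_cons, List.length_cons]
    split_ifs with h <;> push_cast at ih ⊢ <;> omega
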